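-- pv_equiv track=rewrite | github.com/ceekay-munshot/auto-arisag | Arcane Chemical T1/scripts/build_dashboard.py | next_period_labels
-- ===== SOURCE A (Python) =====
-- def next_period_labels(length: int) -> list[str]:
--     quarter = 4
--     fiscal_year = 2026
--     labels: list[str] = []
--     for _ in range(length):
--         labels.append(f"Q{quarter}FY{str(fiscal_year)[-2:]}")
--         quarter += 1
--         if quarter == 5:
--             quarter = 1
--             fiscal_year += 1
--     return labels
-- ===== SOURCE B (Python) =====
-- def next_period_labels(length: int) -> list[str]:
--     # Closed form: quarter index q counts quarters since Q1FY26; start is q = 3 (Q4FY26).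
--     return [f"Q{q % 4 + 1}FY{str(2026 + q // 4)[-2:]}" for q in range(3, length + 3)]
-- ===== Notes on version B (the rewrite author's own statement) =====
-- stated objective: simpler
-- what changed: Replaces the incremental quarter/fiscal-year state machine with a one-line closed form mapping each quarter index q to year 2026 + q//4 and quarter q%4 + 1.
import Mathlib
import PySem

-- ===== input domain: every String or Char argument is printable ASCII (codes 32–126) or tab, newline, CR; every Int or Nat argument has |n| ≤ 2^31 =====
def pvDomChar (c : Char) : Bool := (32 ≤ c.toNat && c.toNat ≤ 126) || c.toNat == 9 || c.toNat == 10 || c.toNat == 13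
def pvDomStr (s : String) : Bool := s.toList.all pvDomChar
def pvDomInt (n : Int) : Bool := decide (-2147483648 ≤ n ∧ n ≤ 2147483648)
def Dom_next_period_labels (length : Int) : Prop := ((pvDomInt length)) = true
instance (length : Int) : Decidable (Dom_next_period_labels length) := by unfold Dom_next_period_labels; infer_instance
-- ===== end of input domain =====

-- B replaces A's incremental quarter/fiscal-year state machine with a closed-form
-- index-to-label formula (simpler; same O(n) cost).


-- ===== PORT A =====
-- loop state: (quarter, fiscal_year, labels)
def next_period_labels (length : Int) : List String :=
  let st := (PySem.List.pyRange 0 length 1).foldl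
    (fun (s : Int × Int × List String) _ =>
      let labels := s.2.2 ++
        ["Q" ++ PySem.Int.toStr s.1 ++ "FY" ++
          PySem.Str.slice (PySem.Int.toStr s.2.1) (some (-2)) none]
      let quarter := s.1 + 1
      if quarter == 5 then (1, s.2.1 + 1, labels) else (quarter, s.2.1, labels))
    (4, 2026, [])
  st.2.2

-- ===== PORT B =====
def next_period_labels_alt (length : Int) : List String :=
  (PySem.List.pyRange 3 (length + 3) 1).map (fun q =>
    "Q" ++ PySem.Int.toStr (PySem.Int.mod q 4 + 1) ++ "FY" ++
      PySem.Str.slice (PySem.Int.toStr (2026 + PySem.Int.floordiv q 4)) (some (-2)) none)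

-- ===== PRECONDITION & SPEC =====
def Spec_next_period_labels (length : Int) (out : List String) : Prop := out = next_period_labels_alt length
instance (length : Int) (out : List String) : Decidable (Spec_next_period_labels length out) := by unfold Spec_next_period_labels; infer_instance

-- ===== CLAIM (what is proved, stated in full; the proofs are below) =====
def Claim_equal_next_period_labels : Prop := ∀ (length : Int), Dom_next_period_labels length → Spec_next_period_labels length (next_period_labels length)

-- ===== LEMMAS AND PROOFS =====

-- the label for overall quarter index m (m = 0 is Q1FY26; A starts at m = 3)
def pvLbl (m : Nat) : String :=
  "Q" ++ PySem.Int.toStr ((m % 4 : Nat) + 1 : Int) ++ "FY" ++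
    PySem.Str.slice (PySem.Int.toStr ((2026 + m / 4 : Nat) : Int)) (some (-2)) none

-- A's loop state after consuming quarter indices 3, …, k-1 (k ≥ 3), with acc the labels so far
def pvSt (k : Nat) (acc : List String) : Int × Int × List String :=
  (((k % 4 : Nat) + 1 : Int), ((2026 + k / 4 : Nat) : Int), acc)

def pvStep (s : Int × Int × List String) : Int × Int × List String :=
  let labels := s.2.2 ++
    ["Q" ++ PySem.Int.toStr s.1 ++ "FY" ++
      PySem.Str.slice (PySem.Int.toStr s.2.1) (some (-2)) none]
  let quarter := s.1 + 1
  if quarter == 5 then (1, s.2.1 + 1, labels) else (quarter, s.2.1, labels)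

theorem pvStep_st (k : Nat) (acc : List String) :
    pvStep (pvSt k acc) = pvSt (k + 1) (acc ++ [pvLbl k]) := by
  simp only [pvStep, pvSt, pvLbl]
  by_cases h : k % 4 = 3
  · have h2 : (k + 1) % 4 = 0 := by omega
    have h3 : (k + 1) / 4 = k / 4 + 1 := by omega
    simp [h2, h3]
    rw [if_pos (by omega : (k : Int) % 4 + 1 + 1 = 5)]
    simp [add_assoc]
  · have h2 : (k + 1) % 4 = k % 4 + 1 := by omega
    have h3 : (k + 1) / 4 = k / 4 := by omega
    simp [h2, h3]
    omega

theorem pvFoldl_st (l : List Int) : ∀ (k : Nat) (acc : List String),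
    l.foldl (fun s _ => pvStep s) (pvSt k acc)
      = pvSt (k + l.length) (acc ++ (List.range' k l.length).map pvLbl) := by
  induction l with
  | nil => intro k acc; simp
  | cons x t ih =>
      intro k acc
      simp only [List.foldl_cons, pvStep_st, ih (k + 1) (acc ++ [pvLbl k]),
        List.length_cons, List.range'_succ, List.map_cons]
      rw [show k + 1 + t.length = k + (t.length + 1) from by omega]
      simp [pvSt]

-- ===== VERDICT (by name: the statement is the Claim_ definition above) =====

theorem next_period_labels_spec : Claim_equal_next_period_labels := by
  intro length _
  unfold Spec_next_period_labels next_period_labels next_period_labels_alt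
  have hst : ((4 : Int), (2026 : Int), ([] : List String)) = pvSt 3 [] := by
    simp [pvSt]
  have hstep : (fun (s : Int × Int × List String) (_ : Int) =>
      let labels := s.2.2 ++
        ["Q" ++ PySem.Int.toStr s.1 ++ "FY" ++
          PySem.Str.slice (PySem.Int.toStr s.2.1) (some (-2)) none]
      let quarter := s.1 + 1
      if quarter == 5 then (1, s.2.1 + 1, labels) else (quarter, s.2.1, labels))
      = fun s _ => pvStep s := rfl
  rw [hst, hstep, pvFoldl_st]
  simp only [pvSt, List.nil_append]
  have hlen : (PySem.List.pyRange 0 length 1).length = length.toNat := by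
    rw [PySem.List.length_pyRange_one]; congr 1; omega
  rw [hlen, PySem.List.pyRange_one, List.map_map]
  have hr : List.range' 3 length.toNat = (List.range (length + 3 - 3).toNat).map (fun k => 3 + k) := by
    have : (length + 3 - 3).toNat = length.toNat := by omega
    rw [this, List.range'_eq_map_range]
  rw [hr, List.map_map]
  apply List.map_congr_left
  intro k _
  simp only [Function.comp, pvLbl]
  have hm : PySem.Int.mod ((3 : Int) + (k : Int)) 4 = (((3 + k) % 4 : Nat) : Int) := by
    simp only [PySem.Int.mod]
    rw [Int.fmod_eq_emod]; simp
  have hd : PySem.Int.floordiv ((3 : Int) + (k : Int)) 4 = (((3 + k) / 4 : Nat) : Int) := by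
    simp only [PySem.Int.floordiv]
    rw [Int.fdiv_eq_ediv]; simp
  rw [hm, hd]
  congr 2
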